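-- pv_equiv track=rewrite | github.com/Semeriuss/A2SV-Labs | practice_problems_2/7. bitwise.py | f
-- ===== SOURCE A (Python) =====
-- def and_list(X):
--     # We initialize our result to 1 as initalizing to
--     # the result to 0 coupled with an AND logic would
--     # absorb every value.
--     res = 1
--     for num in X:
--         # Continuously calculating AND logic
--         # between values consecutively.
--         res &= num
--
--     return res
--
-- def xor_list(X):
--     # We initialize our result to 0 so as not to lose a
--     # single bit due to an XOR operation as same values
--     # give 0 in XOR logic.
--     res = 0
--     for num in X:
--         # Continuously calculating XOR logic
--         # between values consecutively.
--         res ^= num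
--
--     return res
--
-- def getSublist(A):
--     sublists = [[val] for val in A]
--     n = len(A)
--     for i in range(n - 1):
--         temp = [A[i]]
--         for j in range(i + 1, n):
--             temp.append(A[j])
--             sublists.append(temp[:])
--     return sublists
--
-- def f(X):
--     if X == []:
--         return 0
--
--     sublists = getSublist(X)
--     xor_vals = []
--
--     # Retrieving XOR
--     for sublist in sublists:
--         # Appending the XOR value of each sublist
--         # (using xor_list function defined previously)
--         xor_vals.append(xor_list(sublist))
--
--     # Calculating the AND of the XOR values
--     res = and_list(xor_vals)
--
--     return res
-- ===== SOURCE B (Python) =====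
-- def f(X):
--     # AND over the XORs of all contiguous subarrays. For n >= 2 the subarrays
--     # [X[0]], [X[1]] and [X[0], X[1]] are all present, and their XORs cannot
--     # all be odd, while the initial AND seed 1 kills every higher bit, so the
--     # result is 0. For n == 1 the result is 1 & X[0]; for n == 0 it is 0.
--     if len(X) == 1:
--         return X[0] & 1
--     return 0
-- ===== Notes on version B (the rewrite author's own statement) =====
-- stated objective: faster
-- what changed: B replaces A's enumeration of all contiguous subarrays plus per-subarray XOR and final AND by a closed form: for len(X) >= 2 the XORs of [X[0]], [X[1]] and [X[0],X[1]] can never all be odd and the AND seed 1 clears every higher bit, so the result is 0; for len 1 it is X[0] & 1 and for len 0 it is 0.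
import Mathlib
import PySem

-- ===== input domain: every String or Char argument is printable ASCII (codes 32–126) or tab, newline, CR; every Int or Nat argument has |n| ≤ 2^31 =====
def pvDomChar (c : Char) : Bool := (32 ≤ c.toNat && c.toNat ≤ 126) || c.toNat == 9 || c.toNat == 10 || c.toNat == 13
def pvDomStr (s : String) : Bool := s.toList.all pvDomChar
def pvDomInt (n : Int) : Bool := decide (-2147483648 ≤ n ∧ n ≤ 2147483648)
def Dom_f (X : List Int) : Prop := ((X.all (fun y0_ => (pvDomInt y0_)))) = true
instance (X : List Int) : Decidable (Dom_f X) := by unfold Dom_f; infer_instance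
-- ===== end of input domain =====

-- B replaces A's O(n^3) enumeration of all contiguous subarrays by the O(1) observation
-- that for n ≥ 2 the XORs of [X[0]], [X[1]], [X[0],X[1]] cannot all be odd (and the AND
-- seed 1 kills every higher bit), so the answer is 0; for n = 1 it is X[0] & 1, else 0.

-- ===== PORT A =====
def and_list (X : List Int) : Int :=
  X.foldl (fun res num => Int.land res num) 1

def xor_list (X : List Int) : Int :=
  X.foldl (fun res num => Int.xor res num) 0

-- A's indexing A[i] is always in range here; pyGetD with default 0 is exact on those accesses.
def getSublist (A : List Int) : List (List Int) :=
  (PySem.List.pyRange 0 ((A.length : Int) - 1) 1).foldl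
    (fun sublists i =>
      ((PySem.List.pyRange (i + 1) (A.length : Int) 1).foldl
        (fun (st : List Int × List (List Int)) j =>
          let temp := st.1 ++ [PySem.List.pyGetD A j 0]
          (temp, st.2 ++ [temp]))
        ([PySem.List.pyGetD A i 0], sublists)).2)
    (A.map (fun val => [val]))

def f (X : List Int) : Int :=
  if X = [] then 0
  else
    and_list ((getSublist X).foldl (fun acc sublist => acc ++ [xor_list sublist]) [])

-- ===== PORT B =====
def f_alt (X : List Int) : Int :=
  match X with
  | [x] => Int.land x 1
  | _ => 0

-- ===== PRECONDITION & SPEC =====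
def Spec_f (X : List Int) (out : Int) : Prop := out = f_alt X
instance (X : List Int) (out : Int) : Decidable (Spec_f X out) := by unfold Spec_f; infer_instance

-- ===== CLAIM (what is proved, stated in full; the proofs are below) =====
def Claim_equal_f : Prop := ∀ (X : List Int), Dom_f X → Spec_f X (f X)

-- ===== LEMMAS AND PROOFS =====

-- parity of Nat xor
theorem natXorPar (m n : Nat) : (m ^^^ n) % 2 = (m % 2 + n % 2) % 2 := by
  have h := Nat.testBit_xor m n 0
  simp only [Nat.testBit_zero] at h
  rcases Nat.mod_two_eq_zero_or_one m with h1 | h1 <;>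
  rcases Nat.mod_two_eq_zero_or_one n with h2 | h2 <;>
    simp [h1, h2] at h ⊢ <;> omega

theorem int_xor_par (a b : Int) : (Int.xor a b) % 2 = if a % 2 = b % 2 then 0 else 1 := by
  cases a with
  | ofNat m => cases b with
    | ofNat n =>
        show ((m ^^^ n : Nat) : Int) % 2 = _
        have h := natXorPar m n
        simp only [Int.ofNat_eq_natCast]
        split <;> omega
    | negSucc n =>
        show (Int.negSucc (m ^^^ n)) % 2 = _
        have h := natXorPar m n
        simp only [Int.negSucc_eq, Int.ofNat_eq_natCast]
        split <;> omega
  | negSucc m => cases b with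
    | ofNat n =>
        show (Int.negSucc (m ^^^ n)) % 2 = _
        have h := natXorPar m n
        simp only [Int.negSucc_eq, Int.ofNat_eq_natCast]
        split <;> omega
    | negSucc n =>
        show ((m ^^^ n : Nat) : Int) % 2 = _
        have h := natXorPar m n
        simp only [Int.negSucc_eq]
        split <;> omega

theorem int_zero_xor (a : Int) : Int.xor 0 a = a := by
  cases a with
  | ofNat n => show ((0 ^^^ n : Nat) : Int) = _; simp [Int.ofNat_eq_natCast]
  | negSucc n => show Int.negSucc (0 ^^^ n) = _; simp

theorem ldiff_one (m : Nat) : Nat.ldiff 1 m = if m % 2 = 1 then 0 else 1 := by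
  apply Nat.eq_of_testBit_eq; intro k
  cases k with
  | zero =>
      rw [Nat.testBit_ldiff]
      rcases Nat.mod_two_eq_zero_or_one m with h | h <;>
        simp [Nat.testBit_zero, h]
  | succ k =>
      rw [Nat.testBit_ldiff]
      rcases Nat.mod_two_eq_zero_or_one m with h | h <;>
        simp [h, Nat.testBit_succ]

theorem land1L (a : Int) : Int.land 1 a = a % 2 := by
  cases a with
  | ofNat n =>
      show ((1 &&& n : Nat) : Int) = _
      rw [Nat.one_and_eq_mod_two]
      simp only [Int.ofNat_eq_natCast]; omega
  | negSucc m =>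
      show ((Nat.ldiff 1 m : Nat) : Int) = _
      rw [ldiff_one]
      rcases Nat.mod_two_eq_zero_or_one m with h | h <;> simp [h, Int.negSucc_eq] <;> omega

theorem land1R (a : Int) : Int.land a 1 = a % 2 := by
  cases a with
  | ofNat n =>
      show ((n &&& 1 : Nat) : Int) = _
      rw [Nat.and_one_is_mod]
      simp only [Int.ofNat_eq_natCast]; omega
  | negSucc m =>
      show ((Nat.ldiff 1 m : Nat) : Int) = _
      rw [ldiff_one]
      rcases Nat.mod_two_eq_zero_or_one m with h | h <;> simp [h, Int.negSucc_eq] <;> omega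

theorem land0 (a : Int) : Int.land 0 a = 0 := by
  cases a with
  | ofNat n => show ((0 &&& n : Nat) : Int) = 0; simp
  | negSucc m => show ((Nat.ldiff 0 m : Nat) : Int) = 0; simp [Nat.ldiff]

theorem foldl_land_zero (xs : List Int) :
    xs.foldl (fun res num => Int.land res num) 0 = 0 := by
  induction xs with
  | nil => rfl
  | cons x xs ih => simpa [land0] using ih

theorem and_list_char (xs : List Int) :
    and_list xs = if xs.all (fun v => v % 2 == 1) then 1 else 0 := by
  unfold and_list
  induction xs with
  | nil => rfl
  | cons x xs ih =>
      simp only [List.foldl_cons, land1L]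
      rcases Int.emod_two_eq_zero_or_one x with h | h
      · conv_lhs => rw [h]
        rw [foldl_land_zero]
        simp [List.all_cons, h]
      · conv_lhs => rw [h]
        rw [ih]
        simp [List.all_cons, h]

theorem and_list_eq_zero {xs : List Int} {v : Int} (hv : v ∈ xs) (h : v % 2 = 0) :
    and_list xs = 0 := by
  rw [and_list_char]
  rw [if_neg]
  intro hall
  rw [List.all_eq_true] at hall
  have := hall v hv
  rw [beq_iff_eq] at this
  omega

-- a foldl preserves any invariant its step preserves
theorem foldl_pres {σ ι : Type} (P : σ → Prop) (step : σ → ι → σ)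
    (h : ∀ s i, P s → P (step s i)) :
    ∀ (l : List ι) (s : σ), P s → P (l.foldl step s) := by
  intro l
  induction l with
  | nil => intro s hs; exact hs
  | cons x xs ih => intro s hs; exact ih _ (h s x hs)

theorem mem_inner (A : List Int) (L : List Int) (js : List Int)
    (st : List Int × List (List Int)) (hL : L ∈ st.2) :
    L ∈ (js.foldl
      (fun (st : List Int × List (List Int)) j =>
        let temp := st.1 ++ [PySem.List.pyGetD A j 0]
        (temp, st.2 ++ [temp])) st).2 := by
  refine foldl_pres (fun st => L ∈ st.2) _ ?_ js st hL
  intro s i hs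
  exact List.mem_append_left _ hs

theorem mem_getSublist_of_mem_singles (A : List Int) (L : List Int)
    (hL : L ∈ A.map (fun val => [val])) : L ∈ getSublist A := by
  unfold getSublist
  refine foldl_pres (fun acc => L ∈ acc) _ ?_ _ _ hL
  intro acc i hacc
  exact mem_inner A L _ _ hacc

theorem mem_getSublist_pair (x y : Int) (rest : List Int) :
    [x, y] ∈ getSublist (x :: y :: rest) := by
  unfold getSublist
  set A := x :: y :: rest with hA
  have hlen : (A.length : Int) = (rest.length : Int) + 2 := by simp [hA]; omega
  have h1 : (0 : Int) < (A.length : Int) - 1 := by omega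
  rw [PySem.List.pyRange_one_cons h1]
  simp only [List.foldl_cons]
  -- first outer iteration: i = 0
  refine foldl_pres (fun acc => [x, y] ∈ acc) _ ?_ _ _ ?_
  · intro acc i hacc
    exact mem_inner A _ _ _ hacc
  · -- inner fold starting at ([A[0]], singles)
    have h2 : (0 : Int) + 1 < (A.length : Int) := by omega
    rw [PySem.List.pyRange_one_cons h2]
    simp only [List.foldl_cons]
    apply mem_inner
    have hx : PySem.List.pyGetD A (0 : Int) 0 = x := by
      simp [hA, PySem.List.pyGetD_zero_cons]
    have hy : PySem.List.pyGetD A ((0 : Int) + 1) 0 = y := by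
      show PySem.List.pyGetD A (1 : Int) 0 = y
      simp [hA, PySem.List.pyGetD_ofNat']
    rw [hx, hy]
    simp

theorem f_alt_pair (x y : Int) (rest : List Int) : f_alt (x :: y :: rest) = 0 := rfl

theorem f_spec_aux (X : List Int) : f X = f_alt X := by
  match X with
  | [] => rfl
  | [x] =>
      show Int.land 1 (Int.xor 0 x) = Int.land x 1
      rw [int_zero_xor, land1L, land1R]
  | x :: y :: rest =>
      rw [f_alt_pair]
      show (if (x :: y :: rest : List Int) = [] then (0:Int) else _) = 0
      rw [if_neg (by simp)]
      rw [PySem.List.foldl_append_singleton_eq_map]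
      simp only [List.nil_append]
      -- the three decisive members of xor_vals
      have hx : xor_list [x] ∈ (getSublist (x :: y :: rest)).map xor_list :=
        List.mem_map_of_mem (mem_getSublist_of_mem_singles _ _ (by simp))
      have hy : xor_list [y] ∈ (getSublist (x :: y :: rest)).map xor_list :=
        List.mem_map_of_mem (mem_getSublist_of_mem_singles _ _ (by simp))
      have hxy : xor_list [x, y] ∈ (getSublist (x :: y :: rest)).map xor_list :=
        List.mem_map_of_mem (mem_getSublist_pair x y rest)
      have ex : xor_list [x] = x := by
        show Int.xor 0 x = x; exact int_zero_xor x
      have ey : xor_list [y] = y := by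
        show Int.xor 0 y = y; exact int_zero_xor y
      have exy : xor_list [x, y] = Int.xor x y := by
        show Int.xor (Int.xor 0 x) y = _; rw [int_zero_xor]
      rcases Int.emod_two_eq_zero_or_one x with hpx | hpx
      · exact and_list_eq_zero hx (by rw [ex]; exact hpx)
      · rcases Int.emod_two_eq_zero_or_one y with hpy | hpy
        · exact and_list_eq_zero hy (by rw [ey]; exact hpy)
        · refine and_list_eq_zero hxy ?_
          rw [exy, int_xor_par, hpx, hpy]
          simp

-- ===== VERDICT (by name: the statement is the Claim_ definition above) =====
theorem f_spec : Claim_equal_f := by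
  intro X _
  show f X = f_alt X
  exact f_spec_aux X
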